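-- pv_equiv track=rewrite | github.com/tusharsadhwani/daily_byte | p127_longest_phrase.py | longest_phrase
-- ===== SOURCE A (Python) =====
-- from itertools import chain, combinations
-- from typing import List, Set
--
-- def contain_duplicates(*strings: str) -> bool:
--     """Returns if given strings contain repeated chatacters"""
--     chars: Set[str] = set()
--
--     for string in strings:
--         for char in string:
--             if char in chars:
--                 return True
--
--             chars.add(char)
--
--     return False
--
-- def longest_phrase(words: List[str]) -> int:
--     """Returns length of longest phrase without repeated chatacters"""
--     sizes = range(len(words) + 1)
--     word_combos = chain.from_iterable(combinations(words, r=n) for n in sizes)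
--
--     max_phrase_length = 0
--     for word_combo in word_combos:
--         if not contain_duplicates(*word_combo):
--             phrase_length = sum(len(word) for word in word_combo)
--             if phrase_length > max_phrase_length:
--                 max_phrase_length = phrase_length
--
--     return max_phrase_length
-- ===== SOURCE B (Python) =====
-- from typing import List
--
-- def longest_phrase(words: List[str]) -> int:
--     """Returns length of longest phrase without repeated chatacters"""
--     # Precompute a character bitmask per word; -1 marks a word with an internal duplicate.
--     masks = []
--     for word in words:
--         mask = 0
--         for char in word:
--             bit = 1 << ord(char)
--             if mask & bit:
--                 mask = -1
--                 break
--             mask |= bit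
--         masks.append(mask)
--
--     def best(i: int, used: int) -> int:
--         if i == len(words):
--             return 0
--         result = best(i + 1, used)
--         mask = masks[i]
--         if mask >= 0 and not (mask & used):
--             result = max(result, len(words[i]) + best(i + 1, used | mask))
--         return result
--
--     return best(0, 0)
-- ===== Notes on version B (the rewrite author's own statement) =====
-- stated objective: faster
-- what changed: A enumerates every combination of words (grouped by size via itertools) and re-scans each combination's characters from scratch; B precomputes one character bitmask per word and runs a backtracking recursion over word indices that carries the running used-mask, pruning any word whose mask has an internal duplicate or intersects the mask already in use.
import Mathlib
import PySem

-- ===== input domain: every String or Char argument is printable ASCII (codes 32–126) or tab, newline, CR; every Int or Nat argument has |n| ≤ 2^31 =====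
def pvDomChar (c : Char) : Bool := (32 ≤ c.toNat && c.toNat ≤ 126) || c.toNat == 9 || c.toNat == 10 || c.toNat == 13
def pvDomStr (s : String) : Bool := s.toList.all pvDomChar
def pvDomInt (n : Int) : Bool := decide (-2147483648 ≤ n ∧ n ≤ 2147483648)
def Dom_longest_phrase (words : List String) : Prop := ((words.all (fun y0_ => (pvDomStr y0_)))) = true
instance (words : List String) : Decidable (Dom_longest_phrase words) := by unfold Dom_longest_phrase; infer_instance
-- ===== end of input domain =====

-- B replaces A's enumeration of every combination (each re-scanned from scratch for duplicate
-- characters) by per-word character bitmasks computed once and a pruned backtracking recursion.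

-- ===== PORT A =====
-- contain_duplicates: inner loop over one string's chars; `none` = early `return True`
def cdWord (cs : List Char) (chars : PySem.Set Char) : Option (PySem.Set Char) :=
  match cs with
  | [] => some chars
  | c :: rest =>
    if PySem.Set.contains chars c then none
    else cdWord rest (PySem.Set.add chars c)

def cdGo (strings : List String) (chars : PySem.Set Char) : Bool :=
  match strings with
  | [] => false
  | s :: rest =>
    match cdWord s.toList chars with
    | none => true
    | some chars' => cdGo rest chars'

def contain_duplicates (strings : List String) : Bool :=
  cdGo strings PySem.Set.empty

-- itertools.combinations(words, n), tuples in the order the iterator yields them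
def combosN : Nat → List String → List (List String)
  | 0, _ => [[]]
  | _ + 1, [] => []
  | n + 1, w :: rest => (combosN n rest).map (w :: ·) ++ combosN (n + 1) rest

def longest_phrase (words : List String) : Int :=
  let word_combos := (List.range (words.length + 1)).flatMap (fun n => combosN n words)
  word_combos.foldl
    (fun max_phrase_length word_combo =>
      if contain_duplicates word_combo = false then
        let phrase_length := (word_combo.map (fun w => PySem.Str.len w)).sum
        if phrase_length > max_phrase_length then phrase_length else max_phrase_length
      else max_phrase_length)
    0

-- ===== PORT B =====
-- mask of a word's chars; -1 marks an internal duplicate (the broken-out loop)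
def maskOfWord : List Char → Int → Int
  | [], mask => mask
  | c :: rest, mask =>
    let bit : Int := (1 : Int) <<< c.toNat
    if PySem.Int.band mask bit ≠ 0 then -1
    else maskOfWord rest (PySem.Int.bor mask bit)

-- best(i, used) of Source B, recursing on the (word, mask) pairs from index i on
def bestGo : List (String × Int) → Int → Int
  | [], _ => 0
  | (w, m) :: rest, used =>
    let result := bestGo rest used
    if 0 ≤ m ∧ PySem.Int.band m used = 0 then
      max result (PySem.Str.len w + bestGo rest (PySem.Int.bor used m))
    else result

def longest_phrase_alt (words : List String) : Int :=
  let masks := words.map (fun w => maskOfWord w.toList 0)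
  bestGo (words.zip masks) 0

-- ===== PRECONDITION & SPEC =====
def Spec_longest_phrase (words : List String) (out : Int) : Prop := out = longest_phrase_alt words
instance (words : List String) (out : Int) : Decidable (Spec_longest_phrase words out) := by unfold Spec_longest_phrase; infer_instance

-- ===== CLAIM (what is proved, stated in full; the proofs are below) =====
def Claim_equal_longest_phrase : Prop := ∀ (words : List String), Dom_longest_phrase words → Spec_longest_phrase words (longest_phrase words)

-- ===== LEMMAS AND PROOFS =====

-- total length of a combination, and its 0-floored score given already-seen chars
def sumLen (c : List String) : Int := (c.map (fun w => PySem.Str.len w)).sum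

def gSc (seen : PySem.Set Char) (c : List String) : Int :=
  if cdGo c seen = true then 0 else sumLen c

-- max of a list of scores, floored at 0
def Mx (l : List Int) : Int := l.foldl max 0

-- all subsequences of a list, in a convenient recursive order
def subsetsL : List String → List (List String)
  | [] => [[]]
  | w :: rest => subsetsL rest ++ (subsetsL rest).map (w :: ·)

-- A's optimum as a pruned recursion over the set of seen chars (the bridge between A and B)
def specMax : List String → PySem.Set Char → Int
  | [], _ => 0
  | w :: rest, seen =>
    match cdWord w.toList seen with
    | none => specMax rest seen
    | some seen' => max (specMax rest seen) (PySem.Str.len w + specMax rest seen')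

-- the bitmask m represents exactly the characters of the list `seen`
def MRepr (m : Int) (seen : List Char) : Prop :=
  0 ≤ m ∧ ∀ k, (m.toNat.testBit k = true ↔ ∃ c ∈ seen, c.toNat = k)

lemma char_toNat_inj {a b : Char} (h : a.toNat = b.toNat) : a = b :=
  Char.ext (UInt32.toNat_inj.mp h)

lemma one_shiftLeft_int (k : Nat) : (1 : Int) <<< k = ((2 ^ k : Nat) : Int) := by
  simp [Int.shiftLeft_eq]

lemma nat_and_eq_zero_iff (x y : Nat) :
    x &&& y = 0 ↔ ∀ i, ¬(x.testBit i = true ∧ y.testBit i = true) := by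
  constructor
  · intro h i ⟨hx, hy⟩
    have := congrArg (Nat.testBit · i) h
    simp [Nat.testBit_and, hx, hy] at this
  · intro h
    apply Nat.eq_of_testBit_eq
    intro i
    have := h i
    simp only [Nat.testBit_and, Nat.zero_testBit]
    by_cases hx : x.testBit i <;> by_cases hy : y.testBit i <;> simp_all

lemma mrepr_band_zero_iff {a b : Int} {A B : List Char}
    (ha : MRepr a A) (hb : MRepr b B) :
    (PySem.Int.band a b = 0 ↔ ∀ c ∈ A, c ∉ B) := by
  rw [PySem.Int.band_of_nonneg ha.1 hb.1]
  rw [show ((↑(a.toNat &&& b.toNat) : Int) = 0 ↔ a.toNat &&& b.toNat = 0) by exact_mod_cast Iff.rfl]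
  rw [nat_and_eq_zero_iff]
  constructor
  · intro h c hcA hcB
    exact h c.toNat ⟨(ha.2 c.toNat).mpr ⟨c, hcA, rfl⟩, (hb.2 c.toNat).mpr ⟨c, hcB, rfl⟩⟩
  · rintro h i ⟨hx, hy⟩
    obtain ⟨c, hc, rfl⟩ := (ha.2 i).mp hx
    obtain ⟨c', hc', hcc'⟩ := (hb.2 _).mp hy
    exact h c hc (char_toNat_inj hcc'.symm ▸ hc')

lemma mrepr_bor {a b : Int} {A B : List Char} (ha : MRepr a A) (hb : MRepr b B) :
    MRepr (PySem.Int.bor a b) (A ++ B) := by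
  rw [PySem.Int.bor_of_nonneg ha.1 hb.1]
  refine ⟨by positivity, fun k => ?_⟩
  simp only [Int.toNat_natCast, Nat.testBit_or, List.mem_append]
  constructor
  · intro h
    rcases Bool.or_eq_true_iff.mp h with h | h
    · obtain ⟨c, hc, rfl⟩ := (ha.2 k).mp h; exact ⟨c, Or.inl hc, rfl⟩
    · obtain ⟨c, hc, rfl⟩ := (hb.2 k).mp h; exact ⟨c, Or.inr hc, rfl⟩
  · rintro ⟨c, hc | hc, rfl⟩
    · simp [(ha.2 c.toNat).mpr ⟨c, hc, rfl⟩]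
    · simp [(hb.2 c.toNat).mpr ⟨c, hc, rfl⟩]

lemma mrepr_congr {m : Int} {A B : List Char} (h : ∀ x, x ∈ A ↔ x ∈ B)
    (hm : MRepr m A) : MRepr m B := by
  refine ⟨hm.1, fun k => ?_⟩
  rw [hm.2 k]
  constructor
  · rintro ⟨c, hc, rfl⟩; exact ⟨c, (h c).mp hc, rfl⟩
  · rintro ⟨c, hc, rfl⟩; exact ⟨c, (h c).mpr hc, rfl⟩

lemma mrepr_zero : MRepr 0 [] := by
  refine ⟨le_refl 0, fun k => ?_⟩
  simp [Nat.zero_testBit]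

lemma mrepr_pow {c : Char} : MRepr ((2 ^ c.toNat : Nat) : Int) [c] := by
  refine ⟨by positivity, fun k => ?_⟩
  simp only [Int.toNat_natCast, Nat.testBit_two_pow, List.mem_singleton]
  constructor
  · intro h; exact ⟨c, rfl, of_decide_eq_true h⟩
  · rintro ⟨c', rfl, rfl⟩; simp

-- behaviour of A's inner duplicate scan
lemma cdWord_spec (cs : List Char) (seen : PySem.Set Char) :
    cdWord cs seen =
      if cs.Nodup ∧ ∀ c ∈ cs, c ∉ seen then some (PySem.Set.update seen cs) else none := by
  induction cs generalizing seen with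
  | nil => simp [cdWord, PySem.Set.update]
  | cons c cs ih =>
    by_cases hc : c ∈ seen
    · simp [cdWord, hc]
    · have hcont : PySem.Set.contains seen c = false := by
        rw [← Bool.not_eq_true]
        exact fun h => hc ((PySem.Set.contains_iff seen c).mp h)
      have hcond : ((c :: cs).Nodup ∧ ∀ x ∈ c :: cs, x ∉ seen)
          ↔ (cs.Nodup ∧ ∀ x ∈ cs, x ∉ PySem.Set.add seen c) := by
        simp only [List.nodup_cons, List.mem_cons, PySem.Set.mem_add]
        constructor
        · rintro ⟨⟨hccs, hnd⟩, hall⟩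
          exact ⟨hnd, fun x hx => by
            rintro (h | rfl)
            · exact hall x (Or.inr hx) h
            · exact hccs hx⟩
        · rintro ⟨hnd, hall⟩
          refine ⟨⟨fun hccs => hall c hccs (Or.inr rfl), hnd⟩, ?_⟩
          rintro x (rfl | hx)
          · exact hc
          · exact fun hxs => hall x hx (Or.inl hxs)
      have hupd : PySem.Set.update seen (c :: cs) = PySem.Set.update (PySem.Set.add seen c) cs := by
        simp [PySem.Set.update]
      simp only [cdWord, hcont, Bool.false_eq_true, if_false, ih (PySem.Set.add seen c)]
      rw [hupd]
      by_cases h : cs.Nodup ∧ ∀ x ∈ cs, x ∉ PySem.Set.add seen c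
      · rw [if_pos h, if_pos (hcond.mpr h)]
      · rw [if_neg h, if_neg (fun hh => h (hcond.mp hh))]

-- behaviour of B's mask builder
lemma maskOfWord_spec (cs : List Char) :
    ∀ (m : Int) (S : List Char), MRepr m S →
      ((cs.Nodup ∧ ∀ c ∈ cs, c ∉ S) ∧ MRepr (maskOfWord cs m) (S ++ cs)) ∨
      (¬(cs.Nodup ∧ ∀ c ∈ cs, c ∉ S) ∧ maskOfWord cs m = -1) := by
  induction cs with
  | nil =>
    intro m S hm
    left
    refine ⟨⟨List.nodup_nil, by simp⟩, ?_⟩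
    simpa [maskOfWord] using hm
  | cons c cs ih =>
    intro m S hm
    have hbit : (1 : Int) <<< c.toNat = ((2 ^ c.toNat : Nat) : Int) := one_shiftLeft_int _
    have hdis := mrepr_band_zero_iff hm (mrepr_pow (c := c))
    by_cases hc : c ∈ S
    · right
      have hband : PySem.Int.band m ((1 : Int) <<< c.toNat) ≠ 0 := by
        rw [hbit]
        intro h
        exact (hdis.mp h) c hc (List.mem_singleton_self c)
      refine ⟨?_, by simp [maskOfWord, hband]⟩
      rintro ⟨_, hall⟩
      exact hall c (List.mem_cons_self) hc
    · have hband : PySem.Int.band m ((1 : Int) <<< c.toNat) = 0 := by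
        rw [hbit]
        apply hdis.mpr
        intro x hx hxc
        rw [List.mem_singleton] at hxc
        exact hc (hxc ▸ hx)
      have hstep : maskOfWord (c :: cs) m
          = maskOfWord cs (PySem.Int.bor m ((1 : Int) <<< c.toNat)) := by
        simp [maskOfWord, hband]
      have hm' : MRepr (PySem.Int.bor m ((1 : Int) <<< c.toNat)) (S ++ [c]) := by
        rw [hbit]; exact mrepr_bor hm mrepr_pow
      have hcond : ((c :: cs).Nodup ∧ ∀ x ∈ c :: cs, x ∉ S)
          ↔ (cs.Nodup ∧ ∀ x ∈ cs, x ∉ S ++ [c]) := by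
        constructor
        · rintro ⟨hnd, hall⟩
          rw [List.nodup_cons] at hnd
          refine ⟨hnd.2, fun x hx hmem => ?_⟩
          rcases List.mem_append.mp hmem with hxS | hxc
          · exact hall x (List.mem_cons_of_mem c hx) hxS
          · rw [List.mem_singleton] at hxc
            exact hnd.1 (hxc ▸ hx)
        · rintro ⟨hnd, hall⟩
          constructor
          · rw [List.nodup_cons]
            exact ⟨fun hccs => hall c hccs (List.mem_append_right _ (List.mem_singleton_self c)), hnd⟩
          · intro x hx hxS
            rcases List.mem_cons.mp hx with rfl | hx'
            · exact hc hxS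
            · exact hall x hx' (List.mem_append_left _ hxS)
      rcases ih (PySem.Int.bor m ((1 : Int) <<< c.toNat)) (S ++ [c]) hm' with ⟨h1, h2⟩ | ⟨h1, h2⟩
      · left
        refine ⟨hcond.mpr h1, ?_⟩
        rw [hstep]
        refine mrepr_congr (fun x => ?_) h2
        simp [List.mem_append, List.mem_cons]
      · right
        exact ⟨fun hh => h1 (hcond.mp hh), hstep ▸ h2⟩

-- ===== L1: B's backtracking equals the set-based recursion specMax =====
lemma bestGo_eq_specMax (words : List String) :
    ∀ (used : Int) (seen : PySem.Set Char), MRepr used seen →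
      bestGo (words.zip (words.map (fun w => maskOfWord w.toList 0))) used = specMax words seen := by
  induction words with
  | nil => intro used seen _; simp [bestGo, specMax]
  | cons w ws ih =>
    intro used seen hrepr
    have hzip : (w :: ws).zip ((w :: ws).map (fun w => maskOfWord w.toList 0))
        = (w, maskOfWord w.toList 0) :: ws.zip (ws.map (fun w => maskOfWord w.toList 0)) := rfl
    rw [hzip]
    rcases maskOfWord_spec w.toList 0 [] mrepr_zero with ⟨⟨hnd, _⟩, hmr⟩ | ⟨hbad, hneg⟩
    · -- word has no internal duplicate; its mask represents its chars
      have hmr' : MRepr (maskOfWord w.toList 0) w.toList :=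
        mrepr_congr (fun x => by simp) hmr
      by_cases hdisj : ∀ c ∈ w.toList, c ∉ seen
      · -- addable: both take the max branch
        have hband : PySem.Int.band (maskOfWord w.toList 0) used = 0 :=
          (mrepr_band_zero_iff hmr' hrepr).mpr hdisj
        have hcw : cdWord w.toList seen = some (PySem.Set.update seen w.toList) := by
          rw [cdWord_spec, if_pos ⟨hnd, hdisj⟩]
        have hrepr' : MRepr (PySem.Int.bor used (maskOfWord w.toList 0))
            (PySem.Set.update seen w.toList) := by
          refine mrepr_congr (fun x => ?_) (mrepr_bor hrepr hmr')
          simp [PySem.Set.mem_update]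
        have hpos : 0 ≤ maskOfWord w.toList 0 ∧ PySem.Int.band (maskOfWord w.toList 0) used = 0 :=
          ⟨hmr'.1, hband⟩
        simp only [bestGo, specMax, hcw]
        rw [if_pos hpos, ih used seen hrepr, ih _ _ hrepr']
      · -- conflicts with seen: both skip
        have hband : PySem.Int.band (maskOfWord w.toList 0) used ≠ 0 := by
          intro h
          rw [not_forall] at hdisj
          obtain ⟨c, hcc⟩ := hdisj
          rw [Classical.not_imp, not_not] at hcc
          obtain ⟨hc, hcs⟩ := hcc
          exact ((mrepr_band_zero_iff hmr' hrepr).mp h c hc) hcs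
        have hcw : cdWord w.toList seen = none := by
          rw [cdWord_spec, if_neg (fun hh => hdisj hh.2)]
        simp only [bestGo, specMax, hcw]
        rw [if_neg (fun hh => hband hh.2)]
        exact ih used seen hrepr
    · -- internal duplicate: mask is -1, cdWord fails
      have hnd : ¬ w.toList.Nodup := by
        intro h; exact hbad ⟨h, by simp⟩
      have hcw : cdWord w.toList seen = none := by
        rw [cdWord_spec, if_neg (fun hh => hnd hh.1)]
      simp only [bestGo, specMax, hcw, hneg]
      rw [if_neg (by rintro ⟨h, _⟩; omega)]
      exact ih used seen hrepr

-- ===== Mx toolbox =====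
lemma foldl_max_init (t : List Int) : ∀ a b : Int, t.foldl max (max a b) = max a (t.foldl max b) := by
  induction t with
  | nil => intro a b; rfl
  | cons c t ih =>
    intro a b
    simp only [List.foldl_cons]
    rw [max_assoc, ih]

lemma mx_append (l₁ l₂ : List Int) : Mx (l₁ ++ l₂) = max (Mx l₁) (Mx l₂) := by
  unfold Mx
  rw [List.foldl_append]
  have h0 : (0 : Int) ≤ List.foldl max 0 l₁ := (PySem.List.le_foldl_max l₁ 0).1
  calc List.foldl max (List.foldl max 0 l₁) l₂
      = List.foldl max (max (List.foldl max 0 l₁) 0) l₂ := by rw [max_eq_left h0]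
    _ = max (List.foldl max 0 l₁) (List.foldl max 0 l₂) := foldl_max_init l₂ _ 0

lemma mx_zero {α : Type} (l : List α) (u : α → Int) (h : ∀ x ∈ l, u x = 0) :
    Mx (l.map u) = 0 := by
  unfold Mx
  rcases PySem.List.foldl_max_mem (l.map u) 0 with hm | hm
  · exact hm
  · obtain ⟨x, hx, hux⟩ := List.mem_map.mp hm
    rw [← hux]
    exact h x hx

lemma mx_shift {α : Type} (l : List α) (lw : Int) (u v : α → Int) (hlw : 0 ≤ lw)
    (_hv : ∀ x ∈ l, 0 ≤ v x)
    (hu : ∀ x ∈ l, (u x = lw + v x) ∨ (u x = 0 ∧ v x = 0))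
    (hex : ∃ x ∈ l, u x = lw + v x ∧ v x = 0) :
    Mx (l.map u) = lw + Mx (l.map v) := by
  obtain ⟨x₀, hx₀, hux₀, hvx₀⟩ := hex
  unfold Mx
  have hvm := PySem.List.le_foldl_max (l.map v) 0
  have hum := PySem.List.le_foldl_max (l.map u) 0
  have hux₀le : u x₀ ≤ List.foldl max 0 (l.map u) := hum.2 _ (List.mem_map_of_mem hx₀)
  apply le_antisymm
  · rcases PySem.List.foldl_max_mem (l.map u) 0 with hm | hm
    · rw [hm]
      have := hvm.1
      omega
    · obtain ⟨x, hx, hux⟩ := List.mem_map.mp hm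
      rw [← hux]
      have h2 : v x ≤ List.foldl max 0 (l.map v) := hvm.2 _ (List.mem_map_of_mem hx)
      have := hvm.1
      rcases hu x hx with h | ⟨h, _⟩ <;> omega
  · rcases PySem.List.foldl_max_mem (l.map v) 0 with hm | hm
    · rw [hm]
      omega
    · obtain ⟨x, hx, hvx⟩ := List.mem_map.mp hm
      rw [← hvx]
      rcases hu x hx with h | ⟨h0, h1⟩
      · have : u x ≤ List.foldl max 0 (l.map u) := hum.2 _ (List.mem_map_of_mem hx)
        omega
      · omega

-- ===== P3: the floored max of scores over all subsequences equals specMax =====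
lemma sumLen_nonneg (c : List String) : 0 ≤ sumLen c := by
  apply List.sum_nonneg
  intro x hx
  obtain ⟨w, _, rfl⟩ := List.mem_map.mp hx
  rw [PySem.Str.len_eq]
  positivity

lemma gSc_nonneg (seen : PySem.Set Char) (c : List String) : 0 ≤ gSc seen c := by
  unfold gSc
  split
  · exact le_refl 0
  · exact sumLen_nonneg c

lemma specMax_nonneg (ws : List String) : ∀ seen : PySem.Set Char, 0 ≤ specMax ws seen := by
  induction ws with
  | nil => intro seen; exact le_refl 0
  | cons w ws ih =>
    intro seen
    cases hcw : cdWord w.toList seen with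
    | none => simp only [specMax, hcw]; exact ih seen
    | some seen' => simp only [specMax, hcw]; exact le_trans (ih seen) (le_max_left _ _)

lemma nil_mem_subsetsL (l : List String) : [] ∈ subsetsL l := by
  induction l with
  | nil => simp [subsetsL]
  | cons w ws ih => exact List.mem_append_left _ ih

lemma mx_subsetsL_eq_specMax (ws : List String) :
    ∀ seen : PySem.Set Char, Mx ((subsetsL ws).map (gSc seen)) = specMax ws seen := by
  induction ws with
  | nil =>
    intro seen
    simp [subsetsL, specMax, Mx, gSc, cdGo, sumLen]
  | cons w ws ih =>
    intro seen
    rw [show subsetsL (w :: ws) = subsetsL ws ++ (subsetsL ws).map (w :: ·) from rfl]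
    rw [List.map_append, mx_append, List.map_map]
    cases hcw : cdWord w.toList seen with
    | none =>
      have hz : Mx ((subsetsL ws).map (gSc seen ∘ (w :: ·))) = 0 := by
        apply mx_zero
        intro c _
        simp [Function.comp, gSc, cdGo, hcw]
      rw [hz, ih seen]
      simp only [specMax, hcw]
      exact max_eq_left (specMax_nonneg ws seen)
    | some seen' =>
      have hshift : Mx ((subsetsL ws).map (gSc seen ∘ (w :: ·)))
          = PySem.Str.len w + Mx ((subsetsL ws).map (gSc seen')) := by
        apply mx_shift
        · rw [PySem.Str.len_eq]; positivity
        · intro c _; exact gSc_nonneg seen' c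
        · intro c _
          cases hgo : cdGo c seen' with
          | true =>
            right
            constructor
            · simp [Function.comp, gSc, cdGo, hcw, hgo]
            · simp [gSc, hgo]
          | false =>
            left
            simp [Function.comp, gSc, cdGo, hcw, hgo, sumLen]
        · refine ⟨[], nil_mem_subsetsL ws, ?_, ?_⟩
          · simp [Function.comp, gSc, cdGo, hcw, sumLen]
          · simp [gSc, cdGo, sumLen]
      rw [hshift, ih seen, ih seen']
      simp only [specMax, hcw]

-- ===== P1: A's enumeration is a permutation of subsetsL =====
def combosF (l : List String) : List (List String) :=
  (List.range (l.length + 1)).flatMap (fun n => combosN n l)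

lemma combosN_gt : ∀ (l : List String) (n : Nat), l.length < n → combosN n l = [] := by
  intro l
  induction l with
  | nil =>
    intro n h
    cases n with
    | zero => omega
    | succ n => rfl
  | cons w ws ih =>
    intro n h
    cases n with
    | zero => omega
    | succ n =>
      simp only [combosN]
      rw [ih n (by simp at h; omega), ih (n + 1) (by simp at h; omega)]
      simp

lemma flatMap_append_perm {α : Type} (L : List Nat) (p q : Nat → List α) :
    (L.flatMap (fun n => p n ++ q n)).Perm (L.flatMap p ++ L.flatMap q) := by
  induction L with
  | nil => simp
  | cons a L ih =>
    simp only [List.flatMap_cons]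
    refine (ih.append_left (p a ++ q a)).trans ?_
    simp only [List.append_assoc]
    exact (List.perm_append_comm_assoc (q a) (L.flatMap p) _).append_left (p a)

lemma combosF_perm_subsetsL (l : List String) : (combosF l).Perm (subsetsL l) := by
  induction l with
  | nil => exact List.Perm.of_eq (by rfl)
  | cons w ws ih =>
    have hzero : combosN (ws.length + 1) ws = [] := combosN_gt ws _ (by omega)
    have hG1 : (List.range (ws.length + 2)).flatMap (fun n => combosN n ws)
        = combosF ws ++ combosN (ws.length + 1) ws := by
      rw [show ws.length + 2 = (ws.length + 1) + 1 from rfl, List.range_succ, List.flatMap_append]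
      simp [combosF]
    have hG2 : (List.range (ws.length + 2)).flatMap (fun n => combosN n ws)
        = [[]] ++ (List.range (ws.length + 1)).flatMap (fun n => combosN (n + 1) ws) := by
      rw [List.range_succ_eq_map, List.flatMap_cons, List.flatMap_map]
      simp [combosN]
    have hY : ([([] : List String)] ++ (List.range (ws.length + 1)).flatMap
        (fun n => combosN (n + 1) ws)) = combosF ws := by
      rw [← hG2, hG1, hzero, List.append_nil]
    have hF : combosF (w :: ws)
        = [[]] ++ (List.range (ws.length + 1)).flatMap
            (fun n => (combosN n ws).map (w :: ·) ++ combosN (n + 1) ws) := by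
      unfold combosF
      rw [show (w :: ws).length + 1 = (ws.length + 1) + 1 from rfl,
        List.range_succ_eq_map, List.flatMap_cons, List.flatMap_map]
      rfl
    rw [hF]
    have step1 : ((List.range (ws.length + 1)).flatMap
          (fun n => (combosN n ws).map (w :: ·) ++ combosN (n + 1) ws)).Perm
        ((List.range (ws.length + 1)).flatMap (fun n => (combosN n ws).map (w :: ·))
          ++ (List.range (ws.length + 1)).flatMap (fun n => combosN (n + 1) ws)) :=
      flatMap_append_perm _ _ _
    have hX : (List.range (ws.length + 1)).flatMap (fun n => (combosN n ws).map (w :: ·))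
        = (combosF ws).map (w :: ·) := by
      unfold combosF
      rw [List.map_flatMap]
    refine ((step1.append_left [[]]).trans ?_)
    rw [hX]
    have step2 : ([([] : List String)] ++ ((combosF ws).map (w :: ·)
          ++ (List.range (ws.length + 1)).flatMap (fun n => combosN (n + 1) ws))).Perm
        (([([] : List String)] ++ (List.range (ws.length + 1)).flatMap (fun n => combosN (n + 1) ws))
          ++ (combosF ws).map (w :: ·)) := by
      rw [List.append_assoc]
      exact List.perm_append_comm.append_left _
    refine step2.trans ?_
    rw [hY]
    rw [show subsetsL (w :: ws) = subsetsL ws ++ (subsetsL ws).map (w :: ·) from rfl]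
    exact ih.append (ih.map _)

-- ===== fold shape: A's loop is a running floored max =====
lemma foldA_shape (L : List (List String)) :
    ∀ acc : Int, 0 ≤ acc →
      L.foldl
        (fun max_phrase_length word_combo =>
          if contain_duplicates word_combo = false then
            let phrase_length := (word_combo.map (fun w => PySem.Str.len w)).sum
            if phrase_length > max_phrase_length then phrase_length else max_phrase_length
          else max_phrase_length)
        acc
      = List.foldl max acc (L.map (gSc PySem.Set.empty)) := by
  induction L with
  | nil => intro acc _; rfl
  | cons c L ih =>
    intro acc hacc
    simp only [List.foldl_cons, List.map_cons]
    have hstep :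
        (if contain_duplicates c = false then
          let phrase_length := (c.map (fun w => PySem.Str.len w)).sum
          if phrase_length > acc then phrase_length else acc
        else acc) = max acc (gSc PySem.Set.empty c) := by
      by_cases hdup : contain_duplicates c = false
      · rw [if_pos hdup]
        have hg : gSc PySem.Set.empty c = (c.map (fun w => PySem.Str.len w)).sum := by
          unfold contain_duplicates at hdup
          have hdup' : cdGo c ([] : List Char) = false := hdup
          simp [gSc, sumLen, hdup']
        rw [hg]
        have hs : 0 ≤ (c.map (fun w => PySem.Str.len w)).sum := sumLen_nonneg c
        show (if (c.map (fun w => PySem.Str.len w)).sum > acc then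
            (c.map (fun w => PySem.Str.len w)).sum else acc)
          = max acc ((c.map (fun w => PySem.Str.len w)).sum)
        by_cases hgt : (c.map (fun w => PySem.Str.len w)).sum > acc
        · rw [if_pos hgt]; omega
        · rw [if_neg hgt]; omega
      · rw [if_neg hdup]
        have hg : gSc PySem.Set.empty c = 0 := by
          unfold contain_duplicates at hdup
          simp only [Bool.not_eq_false] at hdup
          have hdup' : cdGo c ([] : List Char) = true := hdup
          simp [gSc, hdup']
        rw [hg]
        omega
    rw [hstep]
    exact ih _ (le_trans hacc (le_max_left _ _))

lemma mx_perm {l₁ l₂ : List Int} (h : l₁.Perm l₂) : Mx l₁ = Mx l₂ :=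
  List.Perm.foldl_eq h 0

-- ===== VERDICT (by name: the statement is the Claim_ definition above) =====
theorem longest_phrase_spec : Claim_equal_longest_phrase := by
  intro words _
  unfold Spec_longest_phrase
  have h1 : longest_phrase words = Mx ((combosF words).map (gSc PySem.Set.empty)) := by
    exact foldA_shape _ 0 (le_refl 0)
  have h2 : Mx ((combosF words).map (gSc PySem.Set.empty))
      = Mx ((subsetsL words).map (gSc PySem.Set.empty)) :=
    mx_perm ((combosF_perm_subsetsL words).map _)
  have h3 := mx_subsetsL_eq_specMax words PySem.Set.empty
  have h4 := bestGo_eq_specMax words 0 PySem.Set.empty mrepr_zero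
  unfold longest_phrase_alt
  rw [h1, h2, h3, ← h4]
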